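-- pv_equiv track=rewrite | github.com/mustafaMari/Python | Labs/Lab4.py | assign_in_list
-- ===== SOURCE A (Python) =====
-- def assign_in_list(lis):
--     http_requests = ("GET", "HEAD", "POST", "PUT", "DELETE",
--                      "TRACE", "OPTIONS", "CONNECT", "PATCH")
--     methods_l = []
--     resource_l = []
--     protocols_l = []
--     index = 0
--     for item in lis:
--         if index == 3:
--             index = 0
--         if index == 0:
--             if item[1:] not in http_requests:
--                 # for requests that do not have a method we are skipping
--                 continue
--             else:
--                 methods_l.append(item[1:])
--         elif index == 1:
--             resource_l.append(item)
--         elif index == 2: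
--             protocols_l.append(item)
--         index += 1
--     return methods_l, resource_l, protocols_l
-- ===== SOURCE B (Python) =====
-- def assign_in_list(lis):
--     http_requests = ("GET", "HEAD", "POST", "PUT", "DELETE",
--                      "TRACE", "OPTIONS", "CONNECT", "PATCH")
--     methods_l = []
--     resource_l = []
--     protocols_l = []
--     it = iter(lis)
--     for item in it:
--         m = item[1:]
--         if m in http_requests:
--             methods_l.append(m)
--             try:
--                 resource_l.append(next(it))
--                 protocols_l.append(next(it))
--             except StopIteration:
--                 break
--     return methods_l, resource_l, protocols_l
-- ===== Notes on version B (the rewrite author's own statement) =====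
-- stated objective: idiomatic
-- what changed: Replaces the modular index state machine (index 0/1/2 reset at 3) with iterator-driven group consumption: when a method item is found, the next two items are pulled directly from the iterator as resource and protocol, breaking gracefully if the list ends mid-triple.
import Mathlib
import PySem

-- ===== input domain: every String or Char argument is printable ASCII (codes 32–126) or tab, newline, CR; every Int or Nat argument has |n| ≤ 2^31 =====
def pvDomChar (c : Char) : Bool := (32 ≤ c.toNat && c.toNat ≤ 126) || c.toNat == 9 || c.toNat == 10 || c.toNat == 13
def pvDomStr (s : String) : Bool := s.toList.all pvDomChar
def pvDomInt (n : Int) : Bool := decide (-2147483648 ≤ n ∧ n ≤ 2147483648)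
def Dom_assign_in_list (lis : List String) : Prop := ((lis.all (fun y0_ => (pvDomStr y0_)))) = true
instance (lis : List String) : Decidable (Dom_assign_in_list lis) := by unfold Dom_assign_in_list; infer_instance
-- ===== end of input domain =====

-- B replaces A's modular index state machine by iterator-style consumption of the
-- next two items after each recognised method (idiomatic decomposition; same cost).

-- the http_requests tuple (shared module constant of both programs)
def pvHttpRequests : List String :=
  ["GET", "HEAD", "POST", "PUT", "DELETE", "TRACE", "OPTIONS", "CONNECT", "PATCH"]

-- item[1:]  (exact Python slice via PySem)
def pvTail (s : String) : String := PySem.Str.slice s (some 1) none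

-- ===== PORT A =====
-- loop body of A: state = (methods_l, resource_l, protocols_l, index)
def pvStepA (st : List String × List String × List String × Int) (item : String) :
    List String × List String × List String × Int :=
  let (m, r, p, index0) := st
  let index : Int := if index0 == 3 then 0 else index0
  if index == 0 then
    if !(pvHttpRequests.contains (pvTail item)) then
      (m, r, p, index)                         -- continue: index += 1 is skipped
    else
      (m ++ [pvTail item], r, p, index + 1)
  else if index == 1 then
    (m, r ++ [item], p, index + 1)
  else if index == 2 then
    (m, r, p ++ [item], index + 1)
  else
    (m, r, p, index + 1)

def assign_in_list (lis : List String) : List String × List String × List String :=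
  let st := lis.foldl pvStepA ([], [], [], 0)
  (st.1, st.2.1, st.2.2.1)

-- ===== PORT B =====
-- iterator-driven: on a method, pull the next two items as resource/protocol;
-- if the list ends mid-triple, stop (the try/except StopIteration break).
def assign_in_list_alt (lis : List String) : List String × List String × List String :=
  match lis with
  | [] => ([], [], [])
  | item :: rest =>
    let m := pvTail item
    if pvHttpRequests.contains m then
      match rest with
      | a :: b :: rest' =>
        let (ms, rs, ps) := assign_in_list_alt rest'
        (m :: ms, a :: rs, b :: ps)
      | [a] => ([m], [a], [])
      | [] => ([m], [], [])
    else
      assign_in_list_alt rest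

-- ===== PRECONDITION & SPEC =====
def Spec_assign_in_list (lis : List String) (out : List String × List String × List String) : Prop := out = assign_in_list_alt lis
instance (lis : List String) (out : List String × List String × List String) : Decidable (Spec_assign_in_list lis out) := by unfold Spec_assign_in_list; infer_instance

-- ===== CLAIM (what is proved, stated in full; the proofs are below) =====
def Claim_equal_assign_in_list : Prop := ∀ (lis : List String), Dom_assign_in_list lis → Spec_assign_in_list lis (assign_in_list lis)

-- ===== LEMMAS AND PROOFS =====

-- step facts about A's loop body
theorem pvStepA_method (m r p : List String) (i : Int) (hi : i = 0 ∨ i = 3) (item : String)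
    (hc : pvHttpRequests.contains (pvTail item) = true) :
    pvStepA (m, r, p, i) item = (m ++ [pvTail item], r, p, 1) := by
  have hm : pvTail item ∈ pvHttpRequests := by simpa using hc
  rcases hi with h | h <;> simp [pvStepA, h, hm]

theorem pvStepA_skip (m r p : List String) (i : Int) (hi : i = 0 ∨ i = 3) (item : String)
    (hc : ¬ pvHttpRequests.contains (pvTail item) = true) :
    pvStepA (m, r, p, i) item = (m, r, p, 0) := by
  have hm : pvTail item ∉ pvHttpRequests := by simpa using hc
  rcases hi with h | h <;> simp [pvStepA, h, hm]

theorem pvStepA_res (m r p : List String) (a : String) :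
    pvStepA (m, r, p, 1) a = (m, r ++ [a], p, 2) := by simp [pvStepA]

theorem pvStepA_prot (m r p : List String) (b : String) :
    pvStepA (m, r, p, 2) b = (m, r, p ++ [b], 3) := by simp [pvStepA]

-- A's fold, started at loop-top-equivalent index (0 or 3) with accumulators
-- (m, r, p), produces the accumulators extended by B's result (final index existential).
theorem pvFoldA_eq_alt (lis : List String) :
    ∀ (m r p : List String) (i : Int), (i = 0 ∨ i = 3) →
      ∃ j, lis.foldl pvStepA (m, r, p, i) =
        (m ++ (assign_in_list_alt lis).1,
         r ++ (assign_in_list_alt lis).2.1,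
         p ++ (assign_in_list_alt lis).2.2, j) := by
  induction lis using assign_in_list_alt.induct with
  | case1 => intro m r p i _; exact ⟨i, by simp [assign_in_list_alt]⟩
  | case2 item mth hmem a b rest' ms rs ps heq ih =>
    intro m r p i hi
    have hc : pvHttpRequests.contains (pvTail item) = true := hmem
    obtain ⟨j, hj⟩ := ih (m ++ [pvTail item]) (r ++ [a]) (p ++ [b]) 3 (Or.inr rfl)
    refine ⟨j, ?_⟩
    rw [List.foldl_cons, pvStepA_method m r p i hi item hc, List.foldl_cons,
        pvStepA_res, List.foldl_cons, pvStepA_prot, hj]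
    simp [assign_in_list_alt, List.mem_of_elem_eq_true hc, heq]
  | case3 item mth hmem a =>
    intro m r p i hi
    have hc : pvHttpRequests.contains (pvTail item) = true := hmem
    refine ⟨2, ?_⟩
    rw [List.foldl_cons, pvStepA_method m r p i hi item hc, List.foldl_cons, pvStepA_res]
    simp [assign_in_list_alt, List.mem_of_elem_eq_true hc]
  | case4 item mth hmem =>
    intro m r p i hi
    have hc : pvHttpRequests.contains (pvTail item) = true := hmem
    refine ⟨1, ?_⟩
    rw [List.foldl_cons, pvStepA_method m r p i hi item hc]
    simp [assign_in_list_alt, List.mem_of_elem_eq_true hc]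
  | case5 item rest mth hmem ih =>
    intro m r p i hi
    have hc : ¬ pvHttpRequests.contains (pvTail item) = true := hmem
    obtain ⟨j, hj⟩ := ih m r p 0 (Or.inl rfl)
    refine ⟨j, ?_⟩
    rw [List.foldl_cons, pvStepA_skip m r p i hi item hc, hj]
    have hm : pvTail item ∉ pvHttpRequests := by simpa using hc
    have halt : assign_in_list_alt (item :: rest) = assign_in_list_alt rest := by
      cases rest with
      | nil => simp [assign_in_list_alt, hm]
      | cons a t => cases t <;> simp [assign_in_list_alt, hm]
    rw [halt]

-- ===== VERDICT (by name: the statement is the Claim_ definition above) =====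
theorem assign_in_list_spec : Claim_equal_assign_in_list := by
  intro lis _
  obtain ⟨j, hj⟩ := pvFoldA_eq_alt lis [] [] [] 0 (Or.inl rfl)
  simp [Spec_assign_in_list, assign_in_list, hj]
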